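-- pv_equiv track=rewrite | github.com/proboscis/ml-nexus | src/ml_nexus/docker/builder/builder_utils/rye_util.py | create_latest_version_table
-- ===== SOURCE A (Python) =====
-- from collections import defaultdict
--
-- def create_latest_version_table(lines):
--     table = defaultdict(list)
--     unversioned = set()
--     for line in lines:
--         line = line.split("#")[0]
--         if "==" in line:
--             k, v = line.split("==")
--             table[k].append(v)
--         else:
--             unversioned.add(line)
--     unversioned = {k for k in unversioned if k not in table}
--     return unversioned, {k: sorted(v)[-1] for k, v in table.items()}
-- ===== SOURCE B (Python) =====
-- def create_latest_version_table(lines):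
--     parts = [line.split("#")[0] for line in lines]
--     table = {}
--     for part in parts:
--         if "==" in part:
--             k, v = part.split("==")
--             if k not in table or table[k] < v:
--                 table[k] = v
--     unversioned = {p for p in parts if "==" not in p and p not in table}
--     return unversioned, table
-- ===== Notes on version B (the rewrite author's own statement) =====
-- stated objective: alternative
-- what changed: Replaces the single-pass defaultdict-of-lists plus final sorted(v)[-1] reduction by a staged decomposition: first map every line to its pre-'#' part, then a fold over the parts that maintains only the running lexicographic maximum version per key in a plain dict, then one set comprehension over the parts for the unversioned names; no per-key version list is ever built.
import Mathlib
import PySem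

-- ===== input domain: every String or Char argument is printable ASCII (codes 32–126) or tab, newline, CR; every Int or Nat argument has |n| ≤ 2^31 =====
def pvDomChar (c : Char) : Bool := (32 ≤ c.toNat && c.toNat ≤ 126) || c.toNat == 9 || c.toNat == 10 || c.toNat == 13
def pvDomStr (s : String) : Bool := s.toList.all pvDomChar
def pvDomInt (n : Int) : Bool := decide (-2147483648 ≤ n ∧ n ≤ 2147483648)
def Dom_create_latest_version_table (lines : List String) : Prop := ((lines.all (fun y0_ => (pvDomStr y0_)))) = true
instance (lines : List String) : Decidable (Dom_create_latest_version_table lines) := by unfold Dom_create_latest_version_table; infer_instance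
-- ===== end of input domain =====

-- B replaces the single-pass defaultdict-of-lists plus final sorted(v)[-1] reduction by staged
-- passes: map lines to their pre-'#' parts, fold a running-maximum dict over the parts, then one
-- set comprehension for the unversioned names (objective: alternative decomposition).


-- ===== PORT A =====
-- line.split("#")[0] (split with a non-empty separator always yields a non-empty list, so headD is exact)
def pvPart (line : String) : String := ((PySem.Str.split? line "#").getD []).headD ""

def pvStepA (st : PySem.Dict String (List String) × PySem.Set String) (line : String) :
    PySem.Dict String (List String) × PySem.Set String :=
  let part := pvPart line
  if PySem.Str.isIn "==" part then
    match PySem.Str.split? part "==" with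
    | some [k, v] => (st.1.modify k [] (· ++ [v]), st.2)   -- table[k].append(v) (defaultdict)
    | _ => st                                              -- unreachable under Pre_ (ValueError in Python)
  else (st.1, PySem.Set.add st.2 part)

def create_latest_version_table (lines : List String) : List String × (List (String × String)) :=
  let st := lines.foldl pvStepA (PySem.Dict.mk [], PySem.Set.empty)
  (st.2.filter (fun k => !(st.1.contains k)),
   st.1.items.map (fun kv => (kv.1, PySem.List.pyGetD (PySem.List.sorted kv.2 (fun x => x) false) (-1) "")))

-- ===== PORT B =====
-- the per-part fold step of B: keep only the running maximum version per key
def pvStepM (t : PySem.Dict String String) (part : String) : PySem.Dict String String :=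
  if PySem.Str.isIn "==" part then
    match PySem.Str.split? part "==" with
    | some [k, v] =>
        match t.get? k with                                -- 'k not in table or table[k] < v'
        | none => t.insert k v
        | some c => if c < v then t.insert k v else t
    | _ => t                                               -- unreachable under Pre_ (ValueError in Python)
  else t

def create_latest_version_table_alt (lines : List String) : List String × (List (String × String)) :=
  let parts := lines.map pvPart
  let table := parts.foldl pvStepM (PySem.Dict.mk [])
  (PySem.Set.ofList (parts.filter
      (fun p => !(PySem.Str.isIn "==" p) && !(table.contains p))),
   table.items)

-- ===== PRECONDITION & SPEC =====
-- Pre_ excludes exactly the inputs where some line's pre-'#' part contains "==" more than once: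
-- there both Pythons raise ValueError ("too many values to unpack") at 'k, v = ....split("==")'.
def Pre_create_latest_version_table (lines : List String) : Prop :=
  ∀ line ∈ lines, PySem.Str.count (pvPart line) "==" ≤ 1
instance (lines : List String) : Decidable (Pre_create_latest_version_table lines) := by unfold Pre_create_latest_version_table; infer_instance

def pvWitness_create_latest_version_table : List String := ["pkg==1.0", "tool", "pkg==2.0 # pin", "lib#x"]

def Spec_create_latest_version_table (lines : List String) (out : List String × (List (String × String))) : Prop := out = create_latest_version_table_alt lines
instance (lines : List String) (out : List String × (List (String × String))) : Decidable (Spec_create_latest_version_table lines out) := by unfold Spec_create_latest_version_table; infer_instance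

-- ===== CLAIM (what is proved, stated in full; the proofs are below) =====
def Claim_equal_create_latest_version_table : Prop := ∀ (lines : List String), Dom_create_latest_version_table lines → Pre_create_latest_version_table lines → Spec_create_latest_version_table lines (create_latest_version_table lines)

-- ===== LEMMAS AND PROOFS =====

-- A's paired loop, decomposed into its two independent per-part components
def pvStepT (t : PySem.Dict String (List String)) (part : String) : PySem.Dict String (List String) :=
  if PySem.Str.isIn "==" part then
    match PySem.Str.split? part "==" with
    | some [k, v] => t.modify k [] (· ++ [v])
    | _ => t
  else t

def pvStepS (s : PySem.Set String) (part : String) : PySem.Set String :=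
  if PySem.Str.isIn "==" part then s else PySem.Set.add s part

theorem pvStepA_eq (st : PySem.Dict String (List String) × PySem.Set String) (line : String) :
    pvStepA st line = (pvStepT st.1 (pvPart line), pvStepS st.2 (pvPart line)) := by
  by_cases h : PySem.Chars.isIn ['=', '='] (pvPart line).toList = true
  · rcases hsp : PySem.Str.split? (pvPart line) "==" with _ | (_ | ⟨a, _ | ⟨b, _ | _⟩⟩) <;>
      simp [pvStepA, pvStepT, pvStepS, h, hsp]
  · simp [pvStepA, pvStepT, pvStepS, h]

theorem pvFoldA (lines : List String) (t : PySem.Dict String (List String)) (s : PySem.Set String) :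
    lines.foldl pvStepA (t, s) =
      ((lines.map pvPart).foldl pvStepT t, (lines.map pvPart).foldl pvStepS s) := by
  induction lines generalizing t s with
  | nil => rfl
  | cons line rest ih =>
      simp only [List.foldl_cons, List.map_cons, pvStepA_eq (t, s) line]
      exact ih _ _

-- the set loop only ever adds the parts without "=="
theorem pvFoldS (l : List String) (s : PySem.Set String) :
    l.foldl pvStepS s =
      (l.filter (fun p => !(PySem.Str.isIn "==" p))).foldl PySem.Set.add s := by
  induction l generalizing s with
  | nil => rfl
  | cons x rest ih =>
      have hstep : pvStepS s x = if PySem.Str.isIn "==" x then s else PySem.Set.add s x := rfl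
      by_cases h : PySem.Str.isIn "==" x = true
      · rw [List.foldl_cons, List.filter_cons, hstep, if_pos h, if_neg (by rw [h]; simp)]
        exact ih s
      · have hx : PySem.Str.isIn "==" x = false := by
          cases hxx : PySem.Str.isIn "==" x
          · rfl
          · exact absurd hxx h
        rw [List.foldl_cons, List.filter_cons, hstep, if_neg h, if_pos (by rw [hx]; rfl),
          List.foldl_cons]
        exact ih _

-- filtering commutes with building a set element by element
theorem pvFilter_foldl_add (l : List String) (s : PySem.Set String) (p : String → Bool) :
    (l.foldl PySem.Set.add s).filter p = (l.filter p).foldl PySem.Set.add (s.filter p) := by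
  induction l generalizing s with
  | nil => rfl
  | cons x rest ih =>
      rw [List.foldl_cons, List.filter_cons, ih]
      by_cases hp : p x = true
      · rw [if_pos hp, List.foldl_cons]
        congr 1
        by_cases hm : x ∈ s
        · rw [PySem.Set.add_of_mem hm, PySem.Set.add_of_mem (List.mem_filter.mpr ⟨hm, hp⟩)]
        · rw [PySem.Set.add_of_not_mem hm,
            PySem.Set.add_of_not_mem (fun hc => hm (List.mem_filter.mp hc).1),
            List.filter_append]
          simp [hp]
      · rw [if_neg hp]
        congr 1
        by_cases hm : x ∈ s
        · rw [PySem.Set.add_of_mem hm]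
        · rw [PySem.Set.add_of_not_mem hm, List.filter_append]
          simp [hp]

-- the running maximum B maintains; "" is never used (A's lists are non-empty)
def pvListMax : List String → String
  | [] => ""
  | v :: rest => rest.foldl max v

def pvValmap (l : List (String × List String)) : List (String × String) :=
  l.map (fun kv => (kv.1, pvListMax kv.2))

-- the invariant tying A's dict of version lists to B's dict of running maxima
def pvInv (t : PySem.Dict String (List String)) (m : PySem.Dict String String) : Prop :=
  m.items = pvValmap t.items ∧ (∀ kv ∈ t.items, kv.2 ≠ []) ∧ t.keys.Nodup

theorem pvListMax_append (vs : List String) (h : vs ≠ []) (v : String) :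
    pvListMax (vs ++ [v]) = max (pvListMax vs) v := by
  cases vs with
  | nil => simp at h
  | cons v0 rest => simp [pvListMax, List.foldl_append]

theorem pvFind_valmap (l : List (String × List String)) (k : String) :
    (pvValmap l).find? (fun p => p.1 == k) = (l.find? (fun p => p.1 == k)).map (fun kv => (kv.1, pvListMax kv.2)) := by
  induction l with
  | nil => simp [pvValmap]
  | cons hd tl ih =>
      simp only [pvValmap, List.map_cons, List.find?_cons]
      cases h : (hd.1 == k) <;> simp_all [pvValmap]

theorem pvContains_valmap (t : PySem.Dict String (List String)) (m : PySem.Dict String String)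
    (hinv : pvInv t m) (k : String) : m.contains k = t.contains k := by
  simp [PySem.Dict.contains, hinv.1, pvValmap, List.any_map, Function.comp_def]

theorem pvGet_valmap (t : PySem.Dict String (List String)) (m : PySem.Dict String String)
    (hinv : pvInv t m) (k : String) :
    m.get? k = (t.get? k).map pvListMax := by
  simp [PySem.Dict.get?, hinv.1, pvFind_valmap, Option.map_map, Function.comp_def]

-- the step invariant: related tables stay related through one part
theorem pvStepTM (part : String) (t : PySem.Dict String (List String)) (m : PySem.Dict String String)
    (hinv : pvInv t m) : pvInv (pvStepT t part) (pvStepM m part) := by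
  unfold pvStepT pvStepM
  by_cases hIn : PySem.Str.isIn "==" part = true
  · simp only [hIn, if_true]
    rcases hsp : PySem.Str.split? part "==" with _ | l
    · exact hinv
    · match l with
      | [] => exact hinv
      | [a] => exact hinv
      | a :: b :: c :: rest => exact hinv
      | [k, v] =>
          dsimp only
          obtain ⟨hitems, hne, hnd⟩ := hinv
          have hget := pvGet_valmap t m ⟨hitems, hne, hnd⟩ k
          have hcont := pvContains_valmap t m ⟨hitems, hne, hnd⟩ k
          rcases hp : t.items.find? (fun q => q.1 == k) with _ | p
          · -- key absent: A appends [v], B inserts v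
            have hc : t.contains k = false := by
              unfold PySem.Dict.contains
              rw [List.any_eq_false]
              rw [List.find?_eq_none] at hp
              exact fun q hq => by simpa using hp q hq
            have hgt : t.get? k = none := by simp [PySem.Dict.get?, hp]
            have hgm : m.get? k = none := by rw [hget, hgt]; rfl
            have hcm : m.contains k = false := by rw [hcont, hc]
            rw [hgm]
            refine ⟨?_, ?_, ?_⟩
            · simp only [PySem.Dict.modify, PySem.Dict.insert, PySem.Dict.getD, hgt, hc, hcm,
                Bool.false_eq_true, if_false, Option.getD_none]
              simp [pvValmap, hitems, pvListMax]
            · intro kv hkv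
              simp only [PySem.Dict.modify, PySem.Dict.insert, PySem.Dict.getD, hgt, hc,
                Bool.false_eq_true, if_false, Option.getD_none, List.mem_append] at hkv
              rcases hkv with hkv | hkv
              · exact hne kv hkv
              · simp at hkv; simp [hkv]
            · have hknotin : k ∉ t.items.map (fun q => q.1) := by
                intro hk
                obtain ⟨q, hq, hq1⟩ := List.mem_map.mp hk
                have hct : t.contains k = true := by
                  unfold PySem.Dict.contains
                  rw [List.any_eq_true]
                  exact ⟨q, hq, by simp [hq1]⟩
                rw [hc] at hct
                exact absurd hct (by simp)
              simp only [PySem.Dict.modify, PySem.Dict.insert, PySem.Dict.keys, PySem.Dict.getD,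
                hgt, hc, Bool.false_eq_true, if_false, Option.getD_none, List.map_append]
              refine List.nodup_append.mpr ⟨hnd, by simp, fun a ha b hb => ?_⟩
              have hbk : b = k := by simpa using hb
              subst hbk
              intro hab
              exact hknotin (hab ▸ ha)
          · -- key present: A appends to p.2, B keeps the max
            have hpmem := List.mem_of_find?_eq_some hp
            have hpk : p.1 = k := by simpa using List.find?_some hp
            have hc : t.contains k = true := by
              unfold PySem.Dict.contains
              rw [List.any_eq_true]
              exact ⟨p, hpmem, by simpa using List.find?_some hp⟩
            have hgt : t.get? k = some p.2 := by simp [PySem.Dict.get?, hp]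
            have hpne : p.2 ≠ [] := hne p hpmem
            have hgm : m.get? k = some (pvListMax p.2) := by rw [hget, hgt]; rfl
            have hcm : m.contains k = true := by rw [hcont, hc]
            -- with nodup keys, any entry whose key is k IS p
            have huniq : ∀ q ∈ t.items, q.1 = k → q = p := by
              intro q hq hqk
              have h1 := PySem.Dict.get?_of_mem_items (d := t) (k := q.1) (v := q.2) (by simpa using hq) hnd
              rw [hqk, hgt] at h1
              have : q.2 = p.2 := by injection h1 with h2; exact h2.symm
              calc q = (q.1, q.2) := rfl
                _ = (k, p.2) := by rw [hqk, this]
                _ = (p.1, p.2) := by rw [hpk]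
                _ = p := rfl
            have hkeys : (t.modify k [] (· ++ [v])).keys = t.keys := by
              simp only [PySem.Dict.modify, PySem.Dict.insert, PySem.Dict.keys, PySem.Dict.getD,
                hgt, Option.getD_some, hc, if_true, List.map_map]
              refine List.map_congr_left fun q hq => ?_
              by_cases hqk : q.1 = k
              · simp [hqk]
              · simp [hqk]
            rw [hgm]
            dsimp only
            by_cases hlt : pvListMax p.2 < v
            · simp only [hlt, if_true]
              refine ⟨?_, ?_, by rw [hkeys]; exact hnd⟩
              · simp only [PySem.Dict.modify, PySem.Dict.insert, PySem.Dict.getD, hgt, hc, hcm,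
                  if_true, Option.getD_some]
                simp only [pvValmap, hitems, List.map_map, List.map_map]
                refine List.map_congr_left (fun q hq => ?_)
                by_cases hqk : q.1 = k
                · have hqp := huniq q hq hqk
                  simp only [Function.comp_def, hqk, beq_self_eq_true, if_true]
                  rw [pvListMax_append p.2 hpne v, max_eq_right hlt.le]
                · simp [hqk]
              · intro kv hkv
                simp only [PySem.Dict.modify, PySem.Dict.insert, PySem.Dict.getD, hgt, hc,
                  if_true, Option.getD_some, List.mem_map] at hkv
                obtain ⟨q, hq, rfl⟩ := hkv
                by_cases hqk : q.1 = k
                · simp [hqk]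
                · simpa [hqk] using hne q hq
            · simp only [hlt, if_false]
              refine ⟨?_, ?_, by rw [hkeys]; exact hnd⟩
              · simp only [PySem.Dict.modify, PySem.Dict.insert, PySem.Dict.getD, hgt, hc, if_true,
                  Option.getD_some]
                rw [hitems]
                unfold pvValmap
                rw [List.map_map]
                refine List.map_congr_left fun q hq => ?_
                by_cases hqk : q.1 = k
                · have hq2 : q.2 = p.2 := congrArg Prod.snd (huniq q hq hqk)
                  simp only [Function.comp_def, hqk, beq_self_eq_true, if_true]
                  rw [pvListMax_append p.2 hpne v, max_eq_left (not_lt.mp hlt), hq2]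
                · simp [hqk]
              · intro kv hkv
                simp only [PySem.Dict.modify, PySem.Dict.insert, PySem.Dict.getD, hgt, hc,
                  if_true, Option.getD_some, List.mem_map] at hkv
                obtain ⟨q, hq, rfl⟩ := hkv
                by_cases hqk : q.1 = k
                · simp [hqk]
                · simpa [hqk] using hne q hq
  · simp only [Bool.not_eq_true] at hIn
    simp only [hIn, Bool.false_eq_true, if_false]
    exact hinv

theorem pvFoldTM (parts : List String) (t : PySem.Dict String (List String))
    (m : PySem.Dict String String) (hinv : pvInv t m) :
    pvInv (parts.foldl pvStepT t) (parts.foldl pvStepM m) := by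
  induction parts generalizing t m with
  | nil => exact hinv
  | cons part rest ih => exact ih _ _ (pvStepTM part t m hinv)

-- sorted(vs)[-1] is the running maximum
theorem pvGetD_neg_one {α : Type} (l : List α) (h : l ≠ []) (d : α) :
    PySem.List.pyGetD l (-1) d = l.getLast h := by
  have hl : 0 < l.length := List.length_pos_iff.mpr h
  simp only [PySem.List.pyGetD, PySem.List.pyGet?, PySem.List.pyIdx?]
  rw [if_neg (by omega), if_pos (by omega)]
  simp [List.getLast_eq_getElem]
  rw [List.getElem?_eq_getElem (by omega)]
  rfl
theorem pvPairwise_le_getLast (l : List String) (hpw : l.Pairwise (fun a b => a ≤ b)) (h : l ≠ []) :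
    ∀ x ∈ l, x ≤ l.getLast h := by
  induction l with
  | nil => simp
  | cons a t ih =>
      intro x hx
      cases t with
      | nil => simp at hx; simp [hx]
      | cons b u =>
          rw [List.getLast_cons (by simp)]
          rcases List.mem_cons.mp hx with rfl | hxt
          · exact List.rel_of_pairwise_cons hpw (List.getLast_mem _)
          · exact ih hpw.of_cons (by simp) x hxt
theorem pvListMax_mem (vs : List String) (h : vs ≠ []) : pvListMax vs ∈ vs := by
  cases vs with
  | nil => simp at h
  | cons v0 rest =>
      rcases PySem.List.foldl_max_mem rest v0 with h1 | h1
      · simp [pvListMax, h1]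
      · simp [pvListMax]; right; exact h1
theorem pvListMax_isMax (vs : List String) : ∀ y ∈ vs, y ≤ pvListMax vs := by
  cases vs with
  | nil => simp
  | cons v0 rest =>
      intro y hy
      rcases List.mem_cons.mp hy with rfl | hyt
      · exact (PySem.List.le_foldl_max rest y).1
      · exact (PySem.List.le_foldl_max rest v0).2 y hyt
theorem pvSortedLast (vs : List String) (h : vs ≠ []) :
    PySem.List.pyGetD (PySem.List.sorted vs (fun x => x) false) (-1) "" = pvListMax vs := by
  have hperm := PySem.List.sorted_perm vs (fun x => x) false
  have hne : PySem.List.sorted vs (fun x => x) false ≠ [] := by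
    intro h0
    rw [h0] at hperm
    exact h hperm.symm.eq_nil
  rw [pvGetD_neg_one _ hne]
  have hpw := PySem.List.sorted_pairwise vs (fun x => x)
  apply le_antisymm
  · exact pvListMax_isMax vs _ (hperm.mem_iff.mp (List.getLast_mem hne))
  · exact pvPairwise_le_getLast _ hpw hne _ (hperm.mem_iff.mpr (pvListMax_mem vs h))

-- ===== VERDICT (by name: the statement is the Claim_ definition above) =====
theorem create_latest_version_table_spec : Claim_equal_create_latest_version_table := by
  intro lines _ _
  unfold Spec_create_latest_version_table create_latest_version_table create_latest_version_table_alt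
  rw [pvFoldA]
  dsimp only
  obtain ⟨hitems, hne, hnd⟩ := pvFoldTM (lines.map pvPart) (PySem.Dict.mk []) (PySem.Dict.mk [])
    ⟨rfl, by simp, by simp [PySem.Dict.keys]⟩
  refine Prod.ext ?_ ?_
  · dsimp only
    rw [pvFoldS]
    have hcomm := pvFilter_foldl_add
      ((lines.map pvPart).filter (fun q => !(PySem.Str.isIn "==" q))) PySem.Set.empty
      (fun x => !(((lines.map pvPart).foldl pvStepT (PySem.Dict.mk [])).contains x))
    rw [hcomm, List.filter_filter, PySem.Set.ofList_eq_foldl]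
    congr 1
    refine List.filter_congr (fun x _ => ?_)
    rw [pvContains_valmap _ _ ⟨hitems, hne, hnd⟩ x]
    exact Bool.and_comm _ _
  · dsimp only
    rw [hitems]
    unfold pvValmap
    refine (List.map_congr_left (fun kv hkv => ?_)).symm
    rw [pvSortedLast kv.2 (hne kv hkv)]
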